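-- pv_equiv track=rewrite | github.com/CSU-NLP-Group/mediKAL | src/evaluate/process_ref.py | set_match
-- ===== SOURCE A (Python) =====
-- def set_match(pred, refs, matched):
--     pred_set = [p[0] for p in pred]
--     return_idx = None
--     for idx, ref in enumerate(refs):
--         ref_set = [r[0] for r in ref]
--         for p in pred_set:
--             for r in ref_set:
--                 if p == r and matched[idx] == 0:
--                     return_idx = idx
--     return return_idx
-- ===== SOURCE B (Python) =====
-- def set_match(pred, refs, matched):
--     firsts = {p[0] for p in pred}
--     for idx in range(min(len(refs), len(matched)) - 1, -1, -1):
--         if matched[idx] == 0 and any(r[0] in firsts for r in refs[idx]):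
--             return idx
--     return None
-- ===== Notes on version B (the rewrite author's own statement) =====
-- stated objective: faster
-- what changed: A scans every (pred-first, ref-first) pair for every ref with a triple nested loop and overwrites the result; B builds a set of pred first-elements once and does a single reverse scan over refs, returning the first index (i.e. the last qualifying one) whose first-elements intersect the set and whose matched flag is 0.
import Mathlib
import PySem

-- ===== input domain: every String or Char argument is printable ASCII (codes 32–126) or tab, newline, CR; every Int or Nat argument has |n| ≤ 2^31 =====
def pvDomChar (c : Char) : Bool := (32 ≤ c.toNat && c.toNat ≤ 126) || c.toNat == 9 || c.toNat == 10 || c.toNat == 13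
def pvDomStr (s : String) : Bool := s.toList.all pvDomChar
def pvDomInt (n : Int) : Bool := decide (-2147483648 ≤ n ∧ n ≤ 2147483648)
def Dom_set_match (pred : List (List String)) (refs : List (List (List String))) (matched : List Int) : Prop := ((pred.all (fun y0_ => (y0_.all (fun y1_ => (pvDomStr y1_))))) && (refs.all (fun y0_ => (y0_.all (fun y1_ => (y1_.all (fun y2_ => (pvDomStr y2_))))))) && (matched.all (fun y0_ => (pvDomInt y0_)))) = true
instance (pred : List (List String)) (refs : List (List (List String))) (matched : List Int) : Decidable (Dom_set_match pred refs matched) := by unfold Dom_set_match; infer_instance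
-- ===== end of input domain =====

-- B replaces A's exhaustive triple loop (every pred-first × ref-first pair for every ref) by a set of
-- pred first-elements and a single reverse scan over the refs that returns the first (= last) qualifying
-- index; objective: faster (per ref, membership tests instead of a quadratic pair scan).

-- ===== PORT A =====
def set_match (pred : List (List String)) (refs : List (List (List String))) (matched : List Int) : Option Int :=
  let pred_set := pred.map (fun p => (PySem.List.pyGet? p 0).getD "")
  (PySem.List.enumerate refs 0).foldl
    (fun acc idxref =>
      let idx := idxref.1
      let ref := idxref.2
      let ref_set := ref.map (fun r => (PySem.List.pyGet? r 0).getD "")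
      pred_set.foldl
        (fun acc p =>
          ref_set.foldl
            (fun acc r =>
              if p == r && ((PySem.List.pyGet? matched idx).getD 1 == 0) then some idx else acc)
            acc)
        acc)
    none

-- ===== PORT B =====
-- the 'for idx in range(m - 1, -1, -1): … return idx' loop of Source B, as structural recursion on m
def set_match_altGo (firsts : PySem.Set String) (refs : List (List (List String))) (matched : List Int) : Nat → Option Int
  | 0 => none
  | k + 1 =>
    if ((PySem.List.pyGet? matched (k : Int)).getD 1 == 0) &&
       (((PySem.List.pyGet? refs (k : Int)).getD []).any
          (fun r => PySem.Set.contains firsts ((PySem.List.pyGet? r 0).getD "")))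
    then some (k : Int)
    else set_match_altGo firsts refs matched k

def set_match_alt (pred : List (List String)) (refs : List (List (List String))) (matched : List Int) : Option Int :=
  let firsts := PySem.Set.ofList (pred.map (fun p => (PySem.List.pyGet? p 0).getD ""))
  set_match_altGo firsts refs matched (min refs.length matched.length)

-- ===== PRECONDITION & SPEC =====
-- Pre_ excludes exactly the inputs on which the Python A raises IndexError: an empty inner list in pred
-- or in some ref (p[0] / r[0]), or a ref at an index beyond len(matched) sharing a first element with
-- pred (matched[idx] out of range).
def Pre_set_match (pred : List (List String)) (refs : List (List (List String))) (matched : List Int) : Prop :=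
  (∀ p ∈ pred, p ≠ []) ∧
  (∀ ref ∈ refs, ∀ r ∈ ref, r ≠ []) ∧
  (∀ ref ∈ refs.drop matched.length, ∀ r ∈ ref, ∀ p ∈ pred, p.head? ≠ r.head?)
instance (pred : List (List String)) (refs : List (List (List String))) (matched : List Int) : Decidable (Pre_set_match pred refs matched) := by unfold Pre_set_match; infer_instance

def pvWitness_set_match : List (List String) × List (List (List String)) × List Int :=
  ([["a"], ["b"]], [[["c"]], [["a"], ["d"]]], [0, 0])

def Spec_set_match (pred : List (List String)) (refs : List (List (List String))) (matched : List Int) (out : Option Int) : Prop := out = set_match_alt pred refs matched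
instance (pred : List (List String)) (refs : List (List (List String))) (matched : List Int) (out : Option Int) : Decidable (Spec_set_match pred refs matched out) := by unfold Spec_set_match; infer_instance

-- ===== CLAIM (what is proved, stated in full; the proofs are below) =====
def Claim_equal_set_match : Prop := ∀ (pred : List (List String)) (refs : List (List (List String))) (matched : List Int), Dom_set_match pred refs matched → Pre_set_match pred refs matched → Spec_set_match pred refs matched (set_match pred refs matched)

-- ===== LEMMAS AND PROOFS =====

-- greatest k < n with g k, as a downward scan (proof-side common shape of both ports)
def lastHit (g : Nat → Bool) : Nat → Option Nat
  | 0 => none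
  | k + 1 => if g k then some k else lastHit g k

theorem lastHit_congr (g g' : Nat → Bool) : ∀ n : Nat, (∀ k, k < n → g k = g' k) → lastHit g n = lastHit g' n := by
  intro n
  induction n with
  | zero => intro _; rfl
  | succ k ih =>
    intro h
    simp only [lastHit, h k (Nat.lt_succ_self k), ih (fun j hj => h j (Nat.lt_succ_of_lt hj))]

theorem lastHit_trim (g : Nat → Bool) (m : Nat) : ∀ n : Nat, m ≤ n → (∀ k, m ≤ k → k < n → g k = false) → lastHit g n = lastHit g m := by
  intro n
  induction n with
  | zero => intro h _; rw [Nat.le_zero.mp h]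
  | succ k ih =>
    intro hm hfalse
    rcases Nat.eq_or_lt_of_le hm with h | h
    · rw [h]
    · have hk : m ≤ k := Nat.lt_succ_iff.mp h
      simp only [lastHit, hfalse k hk (Nat.lt_succ_self k), Bool.false_eq_true, if_false]
      exact ih hk (fun j hj hj' => hfalse j hj (Nat.lt_succ_of_lt hj'))

-- a fold that overwrites the accumulator with v whenever the condition fires
theorem foldl_overwrite {α β : Type} (c : α → Bool) (v : β) (l : List α) : ∀ acc : β, l.foldl (fun a x => if c x then v else a) acc = if l.any c then v else acc := by
  induction l with
  | nil => intro acc; simp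
  | cons x xs ih =>
    intro acc
    simp only [List.foldl_cons, List.any_cons, ih]
    by_cases h : c x <;> simp [h]

-- enumerate-fold with 'last firing index wins' equals a downward lastHit scan
theorem foldl_enumerate_lastHit {α : Type} [Inhabited α] (c : Int → α → Bool) (l : List α) : ∀ acc : Option Int,
    (PySem.List.enumerate l 0).foldl (fun a p => if c p.1 p.2 then some p.1 else a) acc
      = match lastHit (fun k => c (k : Int) l[k]!) l.length with
        | some k => some (k : Int)
        | none => acc := by
  induction l using List.reverseRecOn with
  | nil => intro acc; simp [lastHit]
  | append_singleton l x ih =>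
    intro acc
    rw [PySem.List.enumerate_append]
    simp only [PySem.List.enumerate_cons, PySem.List.enumerate_nil, List.foldl_append,
      List.foldl_cons, List.foldl_nil, zero_add]
    rw [ih acc]
    have hx : (l ++ [x])[l.length]! = x := by
      simp [getElem!_pos, List.getElem_append_right]
    have hcongr : lastHit (fun k => c (k : Int) (l ++ [x])[k]!) l.length
        = lastHit (fun k => c (k : Int) l[k]!) l.length := by
      apply lastHit_congr
      intro k hk
      rw [getElem!_pos (l ++ [x]) k (by simp; omega), getElem!_pos l k hk,
        List.getElem_append_left hk]
    simp only [List.length_append, List.length_cons, List.length_nil, lastHit, hx, hcongr]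
    by_cases h : c (l.length : Int) x
    · simp [h]
    · simp [h]

-- B's recursion is lastHit on its own condition
theorem altGo_eq_lastHit (firsts : PySem.Set String) (refs : List (List (List String))) (matched : List Int) : ∀ n : Nat,
    set_match_altGo firsts refs matched n
      = match lastHit (fun k =>
            ((PySem.List.pyGet? matched (k : Int)).getD 1 == 0) &&
            (((PySem.List.pyGet? refs (k : Int)).getD []).any
               (fun r => PySem.Set.contains firsts ((PySem.List.pyGet? r 0).getD "")))) n with
        | some k => some (k : Int)
        | none => none := by
  intro n
  induction n with
  | zero => rfl
  | succ k ih =>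
    simp only [set_match_altGo, lastHit]
    split <;> simp_all

-- the two per-index conditions agree on indices below refs.length
theorem cond_eq (pred : List (List String)) (refs : List (List (List String))) (matched : List Int) (k : Nat) (hk : k < refs.length) :
    ((pred.map (fun p => (PySem.List.pyGet? p 0).getD "")).any (fun p =>
        (refs[k].map (fun r => (PySem.List.pyGet? r 0).getD "")).any (fun r =>
          p == r && ((PySem.List.pyGet? matched (k : Int)).getD 1 == 0))))
      = (((PySem.List.pyGet? matched (k : Int)).getD 1 == 0) &&
         (((PySem.List.pyGet? refs (k : Int)).getD []).any
            (fun r => PySem.Set.contains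
              (PySem.Set.ofList (pred.map (fun p => (PySem.List.pyGet? p 0).getD "")))
              ((PySem.List.pyGet? r 0).getD "")))) := by
  have hrk : (PySem.List.pyGet? refs (k : Int)).getD [] = refs[k] := by
    simp [List.getElem?_eq_getElem hk]
  rw [hrk, Bool.eq_iff_iff]
  simp only [List.any_map, Function.comp, List.any_eq_true, Bool.and_eq_true, beq_iff_eq,
    PySem.Set.contains_iff, PySem.Set.mem_ofList, List.mem_map]
  constructor
  · rintro ⟨p, hp, r, hr, hpr, hmc⟩
    exact ⟨hmc, r, hr, p, hp, hpr⟩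
  · rintro ⟨hmc, r, hr, p, hp, hpe⟩
    exact ⟨p, hp, r, hr, hpe, hmc⟩

-- A's condition is false on indices ≥ len(matched)
theorem cond_false_beyond (pred : List (List String)) (refs : List (List (List String))) (matched : List Int) (k : Nat) (hk : matched.length ≤ k) :
    ((pred.map (fun p => (PySem.List.pyGet? p 0).getD "")).any (fun p =>
        (refs[k]!.map (fun r => (PySem.List.pyGet? r 0).getD "")).any (fun r =>
          p == r && ((PySem.List.pyGet? matched (k : Int)).getD 1 == 0))))
      = false := by
  have h1 : matched[k]? = none := List.getElem?_eq_none hk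
  simp [h1]

-- ===== VERDICT (by name: the statement is the Claim_ definition above) =====
theorem set_match_spec : Claim_equal_set_match := by
  intro pred refs matched _ _
  unfold Spec_set_match set_match set_match_alt
  simp only []
  -- collapse A's inner double fold to a single conditional update
  have hA : (PySem.List.enumerate refs 0).foldl
      (fun acc idxref =>
        (pred.map (fun p => (PySem.List.pyGet? p 0).getD "")).foldl
          (fun acc p =>
            (idxref.2.map (fun r => (PySem.List.pyGet? r 0).getD "")).foldl
              (fun acc r =>
                if p == r && ((PySem.List.pyGet? matched idxref.1).getD 1 == 0) then some idxref.1 else acc)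
              acc)
          acc)
      none
      = (PySem.List.enumerate refs 0).foldl
        (fun acc idxref =>
          if (pred.map (fun p => (PySem.List.pyGet? p 0).getD "")).any (fun p =>
              (idxref.2.map (fun r => (PySem.List.pyGet? r 0).getD "")).any (fun r =>
                p == r && ((PySem.List.pyGet? matched idxref.1).getD 1 == 0)))
          then some idxref.1 else acc)
        none := by
    apply PySem.List.foldl_congr_mem
    intro acc idxref _
    calc (pred.map (fun p => (PySem.List.pyGet? p 0).getD "")).foldl
          (fun acc p =>
            (idxref.2.map (fun r => (PySem.List.pyGet? r 0).getD "")).foldl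
              (fun acc r =>
                if p == r && ((PySem.List.pyGet? matched idxref.1).getD 1 == 0) then some idxref.1 else acc)
              acc) acc
        = (pred.map (fun p => (PySem.List.pyGet? p 0).getD "")).foldl
          (fun acc p =>
            if (idxref.2.map (fun r => (PySem.List.pyGet? r 0).getD "")).any (fun r =>
                p == r && ((PySem.List.pyGet? matched idxref.1).getD 1 == 0))
            then some idxref.1 else acc) acc := by
          apply PySem.List.foldl_congr_mem
          intro acc' p _
          exact foldl_overwrite _ _ _ acc'
      _ = _ := foldl_overwrite _ _ _ acc
  rw [hA, foldl_enumerate_lastHit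
        (fun i ref => (pred.map (fun p => (PySem.List.pyGet? p 0).getD "")).any (fun p =>
          (ref.map (fun r => (PySem.List.pyGet? r 0).getD "")).any (fun r =>
            p == r && ((PySem.List.pyGet? matched i).getD 1 == 0)))) refs none,
      altGo_eq_lastHit]
  have htrim := lastHit_trim
    (fun k => (pred.map (fun p => (PySem.List.pyGet? p 0).getD "")).any (fun p =>
        (refs[k]!.map (fun r => (PySem.List.pyGet? r 0).getD "")).any (fun r =>
          p == r && ((PySem.List.pyGet? matched (k : Int)).getD 1 == 0))))
    (min refs.length matched.length) refs.length (Nat.min_le_left _ _)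
    (fun k hk1 _ => cond_false_beyond pred refs matched k (by omega))
  rw [htrim]
  have hcongr := lastHit_congr
    (fun k => (pred.map (fun p => (PySem.List.pyGet? p 0).getD "")).any (fun p =>
        (refs[k]!.map (fun r => (PySem.List.pyGet? r 0).getD "")).any (fun r =>
          p == r && ((PySem.List.pyGet? matched (k : Int)).getD 1 == 0))))
    (fun k => ((PySem.List.pyGet? matched (k : Int)).getD 1 == 0) &&
        (((PySem.List.pyGet? refs (k : Int)).getD []).any
           (fun r => PySem.Set.contains
             (PySem.Set.ofList (pred.map (fun p => (PySem.List.pyGet? p 0).getD "")))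
             ((PySem.List.pyGet? r 0).getD ""))))
    (min refs.length matched.length)
    (fun k hk => by
      have hkr : k < refs.length := lt_of_lt_of_le hk (Nat.min_le_left _ _)
      simp only [getElem!_pos refs k hkr]
      exact cond_eq pred refs matched k hkr)
  rw [hcongr]
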